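-- pv_equiv track=rewrite | github.com/HeadHunter483/msu-ling | Syntax/Codes/python/morph.py | v_morph
-- ===== SOURCE A (Python) =====
-- def v_morph(string):
--     str5=""
--     word = string.split()
--     mas=[]
--     mas2=[]
--
--     for current_word in word:
--         mas.append(current_word.lower())
--
--     while(len(mas2)!=6):
--         mas2.append("-")
--
--     for s in mas:
--         if (s=='pf' or s=='ipf'): #вид
--             mas2[0]=s
--         if (s=='praes' or s=='praet' or s=='fut'): #время
--             mas2[1]=s
--         if (s=='sg' or s=='pl'): #число
--             mas2[2]=s
--         if (s=='indic' or s=='inf' or s=='imper'): #наклонение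
--             mas2[3]=s
--         if (s=='1p' or s=='2p' or s=='3p'): #лицо
--             mas2[5]=s
--
--     i=0
--     for i in range(len(mas2)):
--         str5=str5+' '+mas2[i]
--
--     return str5
--
-- i=0
-- ===== SOURCE B (Python) =====
-- TAG_SLOT = {
--     "pf": 0, "ipf": 0,
--     "praes": 1, "praet": 1, "fut": 1,
--     "sg": 2, "pl": 2,
--     "indic": 3, "inf": 3, "imper": 3,
--     "1p": 5, "2p": 5, "3p": 5,
-- }
--
--
-- def v_morph(string):
--     # scan the words back-to-front; each slot takes the FIRST match found
--     # (= the last occurrence in the original order) and stops searching.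
--     rev = [w.lower() for w in reversed(string.split())]
--
--     def pick(idx):
--         for w in rev:
--             if TAG_SLOT.get(w) == idx:
--                 return w
--         return "-"
--
--     return "".join(" " + pick(i) for i in range(6))
-- ===== Notes on version B (the rewrite author's own statement) =====
-- stated objective: alternative
-- what changed: A makes one forward pass over the words, overwriting a mutable 6-slot list through five if-chains (last write wins); B never overwrites: it reverses the word list once and fills each slot by an early-exit first-match search over the reversed words, classifying words via a single tag-to-slot map.
import Mathlib
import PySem

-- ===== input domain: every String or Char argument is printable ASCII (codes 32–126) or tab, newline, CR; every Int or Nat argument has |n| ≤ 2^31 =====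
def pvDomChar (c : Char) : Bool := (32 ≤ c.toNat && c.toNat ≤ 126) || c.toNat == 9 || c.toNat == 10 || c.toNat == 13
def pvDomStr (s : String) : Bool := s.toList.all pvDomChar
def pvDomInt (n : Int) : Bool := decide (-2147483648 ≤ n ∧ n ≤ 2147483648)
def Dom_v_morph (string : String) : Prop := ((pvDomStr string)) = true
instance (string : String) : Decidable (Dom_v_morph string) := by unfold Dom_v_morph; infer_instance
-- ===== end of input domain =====

-- B: instead of A's forward pass that overwrites a mutable 6-slot list via five if-chains,
-- B scans the words BACK-TO-FRONT and each slot takes the FIRST match it finds (early exit),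
-- classifying words by a single tag→slot map; objective: alternative decomposition, same result.

-- ===== PORT A =====
-- the 'while len(mas2)!=6: mas2.append("-")' loop; the guard '< 6' (instead of '≠ 6')
-- only makes the recursion total — the loop starts at [] and the length never exceeds 6
def vA_pad (m : List String) : List String :=
  if m.length < 6 then vA_pad (m ++ ["-"]) else m
termination_by 6 - m.length
decreasing_by simp only [List.length_append, List.length_cons, List.length_nil]; omega

-- the body of A's 'for s in mas' loop: the five independent if-assignments
def vA_update (m : List String) (s : String) : List String :=
  let m1 := if s = "pf" ∨ s = "ipf" then m.set 0 s else m
  let m2 := if s = "praes" ∨ s = "praet" ∨ s = "fut" then m1.set 1 s else m1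
  let m3 := if s = "sg" ∨ s = "pl" then m2.set 2 s else m2
  let m4 := if s = "indic" ∨ s = "inf" ∨ s = "imper" then m3.set 3 s else m3
  if s = "1p" ∨ s = "2p" ∨ s = "3p" then m4.set 5 s else m4

def v_morph (string : String) : String :=
  let word := PySem.Str.split₀ string
  let mas := word.foldl (fun acc w => acc ++ [PySem.Str.lower w]) ([] : List String)
  let mas2 := vA_pad []
  let mas2 := mas.foldl vA_update mas2
  (PySem.List.pyRange 0 (mas2.length : Int) 1).foldl
    (fun str5 i => str5 ++ " " ++ PySem.List.pyGetD mas2 i "") ""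

-- ===== PORT B =====
def vTagSlot : PySem.Dict String Int :=
  PySem.Dict.ofList
    [("pf", 0), ("ipf", 0), ("praes", 1), ("praet", 1), ("fut", 1), ("sg", 2), ("pl", 2),
     ("indic", 3), ("inf", 3), ("imper", 3), ("1p", 5), ("2p", 5), ("3p", 5)]

-- Source B's 'pick': linear search with early return over the reversed word list
def vPick (rev : List String) (idx : Int) : String :=
  match rev.find? (fun w => PySem.Dict.get? vTagSlot w == some idx) with
  | some w => w
  | none => "-"

def v_morph_alt (string : String) : String :=
  let rev := ((PySem.Str.split₀ string).reverse).map (fun w => PySem.Str.lower w)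
  PySem.Str.join "" ((PySem.List.pyRange 0 6 1).map (fun i => " " ++ vPick rev i))

-- ===== PRECONDITION & SPEC =====
def Spec_v_morph (string : String) (out : String) : Prop := out = v_morph_alt string
instance (string : String) (out : String) : Decidable (Spec_v_morph string out) := by unfold Spec_v_morph; infer_instance

-- ===== CLAIM (what is proved, stated in full; the proofs are below) =====
def Claim_equal_v_morph : Prop := ∀ (string : String), Dom_v_morph string → Spec_v_morph string (v_morph string)

-- ===== LEMMAS AND PROOFS =====

-- last word of ws satisfying p, defaulting to a (characterises A's overwrite loop per slot)
def lG (p : String → Prop) [DecidablePred p] (ws : List String) (a : String) : String :=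
  ws.foldl (fun acc w => if p w then w else acc) a

theorem lG_cons (p : String → Prop) [DecidablePred p] (x : String) (ws : List String)
    (a : String) : lG p (x :: ws) a = lG p ws (if p x then x else a) := rfl

theorem vA_update_explicit (a b c d e f x : String) :
    vA_update [a, b, c, d, e, f] x =
      [if x = "pf" ∨ x = "ipf" then x else a,
       if x = "praes" ∨ x = "praet" ∨ x = "fut" then x else b,
       if x = "sg" ∨ x = "pl" then x else c,
       if x = "indic" ∨ x = "inf" ∨ x = "imper" then x else d,
       e,
       if x = "1p" ∨ x = "2p" ∨ x = "3p" then x else f] := by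
  simp only [vA_update]
  split_ifs <;> simp_all [List.set]

theorem vA_fold (ws : List String) : ∀ a b c d e f : String,
    ws.foldl vA_update [a, b, c, d, e, f] =
      [lG (fun s => s = "pf" ∨ s = "ipf") ws a,
       lG (fun s => s = "praes" ∨ s = "praet" ∨ s = "fut") ws b,
       lG (fun s => s = "sg" ∨ s = "pl") ws c,
       lG (fun s => s = "indic" ∨ s = "inf" ∨ s = "imper") ws d, e,
       lG (fun s => s = "1p" ∨ s = "2p" ∨ s = "3p") ws f] := by
  induction ws with
  | nil => intro a b c d e f; simp [lG]
  | cons x ws ih =>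
    intro a b c d e f
    rw [List.foldl_cons, vA_update_explicit, ih, lG_cons, lG_cons, lG_cons, lG_cons, lG_cons]

-- last-match fold forward = first match of the reversed list
theorem lG_eq_find (p : String → Prop) [DecidablePred p] (ws : List String) :
    ∀ a : String, lG p ws a = (ws.reverse.find? (fun w => decide (p w))).getD a := by
  induction ws with
  | nil => intro a; simp [lG]
  | cons x ws ih =>
    intro a
    rw [lG_cons, ih, List.reverse_cons, List.find?_append]
    cases h : ws.reverse.find? (fun w => decide (p w)) with
    | some w => simp
    | none => by_cases hp : p x <;> simp [hp]

-- the literal dict: its items list, key uniqueness, and get? as membership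
theorem vItems : vTagSlot.items =
    [("pf", 0), ("ipf", 0), ("praes", 1), ("praet", 1), ("fut", 1), ("sg", 2), ("pl", 2),
     ("indic", 3), ("inf", 3), ("imper", 3), ("1p", 5), ("2p", 5), ("3p", 5)] := by rfl

theorem vNodup : vTagSlot.keys.Nodup := by
  simp only [PySem.Dict.keys, vItems, List.map]
  simp

theorem vPredAux (w : String) (v : Int) :
    PySem.Dict.get? vTagSlot w = some v ↔ (w, v) ∈ vTagSlot.items :=
  PySem.Dict.get?_eq_some_iff_mem_items vTagSlot w v vNodup

-- pointwise, B's dict predicate for each slot is A's literal disjunction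
theorem vPred0 (w : String) :
    (PySem.Dict.get? vTagSlot w == some (0 : Int)) = decide (w = "pf" ∨ w = "ipf") := by
  rw [Bool.eq_iff_iff]
  simp only [beq_iff_eq, vPredAux, vItems, List.mem_cons, List.not_mem_nil, Prod.mk.injEq]
  norm_num
theorem vPred1 (w : String) :
    (PySem.Dict.get? vTagSlot w == some (1 : Int)) = decide (w = "praes" ∨ w = "praet" ∨ w = "fut") := by
  rw [Bool.eq_iff_iff]
  simp only [beq_iff_eq, vPredAux, vItems, List.mem_cons, List.not_mem_nil, Prod.mk.injEq]
  norm_num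
theorem vPred2 (w : String) :
    (PySem.Dict.get? vTagSlot w == some (2 : Int)) = decide (w = "sg" ∨ w = "pl") := by
  rw [Bool.eq_iff_iff]
  simp only [beq_iff_eq, vPredAux, vItems, List.mem_cons, List.not_mem_nil, Prod.mk.injEq]
  norm_num
theorem vPred3 (w : String) :
    (PySem.Dict.get? vTagSlot w == some (3 : Int)) = decide (w = "indic" ∨ w = "inf" ∨ w = "imper") := by
  rw [Bool.eq_iff_iff]
  simp only [beq_iff_eq, vPredAux, vItems, List.mem_cons, List.not_mem_nil, Prod.mk.injEq]
  norm_num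
theorem vPred4 (w : String) :
    (PySem.Dict.get? vTagSlot w == some (4 : Int)) = false := by
  rw [Bool.eq_iff_iff]
  simp only [beq_iff_eq, vPredAux, vItems, List.mem_cons, List.not_mem_nil, Prod.mk.injEq]
  norm_num
theorem vPred5 (w : String) :
    (PySem.Dict.get? vTagSlot w == some (5 : Int)) = decide (w = "1p" ∨ w = "2p" ∨ w = "3p") := by
  rw [Bool.eq_iff_iff]
  simp only [beq_iff_eq, vPredAux, vItems, List.mem_cons, List.not_mem_nil, Prod.mk.injEq]
  norm_num

-- B's pick of slot idx IS A's last-match value for the corresponding group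
theorem vPick_eq_lG (p : String → Prop) [DecidablePred p] (ws : List String) (idx : Int)
    (hpred : ∀ w, (PySem.Dict.get? vTagSlot w == some idx) = decide (p w)) :
    vPick ws.reverse idx = lG p ws "-" := by
  rw [lG_eq_find, vPick]
  have : (fun w => PySem.Dict.get? vTagSlot w == some idx) = (fun w => decide (p w)) :=
    funext hpred
  rw [this]
  cases ws.reverse.find? (fun w => decide (p w)) <;> rfl

theorem vPick4 (ws : List String) : vPick ws.reverse 4 = "-" := by
  rw [vPick]
  have : ws.reverse.find? (fun w => PySem.Dict.get? vTagSlot w == some (4 : Int)) = none :=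
    List.find?_eq_none.mpr (fun x _ => by simp [vPred4])
  rw [this]

theorem vA_pad_empty : vA_pad [] = ["-", "-", "-", "-", "-", "-"] := by
  simp [vA_pad]

-- A's output loop vs B's join, on the six symbolic slot values
theorem vJoin_eq (p q r s t u : String) :
    ((("" ++ " " ++ p ++ " " ++ q ++ " " ++ r ++ " " ++ s ++ " " ++ t ++ " " ++ u) : String)) =
      PySem.Str.join "" ([p, q, r, s, t, u].map (fun x => " " ++ x)) := by
  apply String.toList_inj.mp
  simp [PySem.Str.join, PySem.Chars.join, String.toList_append, List.intercalate, List.intersperse]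

theorem vRange6 : PySem.List.pyRange 0 6 1 = [0, 1, 2, 3, 4, 5] := by decide

-- ===== VERDICT (by name: the statement is the Claim_ definition above) =====
theorem v_morph_spec : Claim_equal_v_morph := by
  intro string _
  unfold Spec_v_morph v_morph v_morph_alt
  dsimp only
  rw [PySem.List.foldl_append_singleton_eq_map, vA_pad_empty]
  set ws := (PySem.Str.split₀ string).map (fun w => PySem.Str.lower w) with hws
  have hrev : ((PySem.Str.split₀ string).reverse).map (fun w => PySem.Str.lower w) =
      ws.reverse := by rw [hws, List.map_reverse]
  rw [vA_fold, hrev, vRange6]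
  simp only [List.map]
  rw [vPick_eq_lG _ ws 0 vPred0, vPick_eq_lG _ ws 1 vPred1, vPick_eq_lG _ ws 2 vPred2,
      vPick_eq_lG _ ws 3 vPred3, vPick4, vPick_eq_lG _ ws 5 vPred5]
  rw [PySem.List.foldl_pyRange_zero_pyGetD' _ "" (fun str5 x => str5 ++ " " ++ x) ""]
  simp only [List.foldl_cons, List.foldl_nil]
  exact vJoin_eq _ _ _ _ _ _
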